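-- pv_equiv track=rewrite | github.com/David-5-5/tutorial | python/algo/202409/leetcode2354.py | countExcellentPairs2
-- ===== SOURCE A (Python) =====
-- from collections import Counter
-- from itertools import accumulate
-- from typing import List
--
-- def countExcellentPairs2(nums: List[int], k: int) -> int:
--     if k > 58:return 0
--     # 自行解答, 优化 902
--     # ns = set(nums)
--
--     # cnt = [0] * 30
--     # for v in ns:
--     #     vc = 0
--     #     for i in range(30):
--     #         if v >> i & 1: vc+=1
--     #     cnt[vc] += 1
--
--     # 参考题解，调用系统函数
--     cnt1 = Counter(x.bit_count() for x in set(nums))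
--     cnt = [cnt1[i] for i in range(30)]
--
--     pre = list(accumulate(cnt))
--     res = 0
--     for i in range(1, len(pre)):
--         j = max(i, k-i)
--         if j >= len(pre): continue
--         res += 2 * cnt[i] * (pre[-1] - pre[j-1]) - (cnt[i]*cnt[i] if i==j else 0)
--
--     return res
-- ===== SOURCE B (Python) =====
-- def countExcellentPairs2(nums, k):
--     cnt = [0] * 30
--     for x in set(nums):
--         b = x.bit_count()
--         if b < 30:
--             cnt[b] += 1
--     res = 0
--     for i in range(1, 30):
--         for j in range(1, 30):
--             if i + j >= k:
--                 res += cnt[i] * cnt[j]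
--     return res
-- ===== Notes on version B (the rewrite author's own statement) =====
-- stated objective: simpler
-- what changed: A builds a prefix-sum array over the popcount buckets and, per popcount i, counts partners via a suffix lookup doubled with a diagonal correction; B just counts ordered pairs directly with a double loop over the 29 popcount buckets, with no prefix sums, no max/continue logic and no diagonal correction.
import Mathlib
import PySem

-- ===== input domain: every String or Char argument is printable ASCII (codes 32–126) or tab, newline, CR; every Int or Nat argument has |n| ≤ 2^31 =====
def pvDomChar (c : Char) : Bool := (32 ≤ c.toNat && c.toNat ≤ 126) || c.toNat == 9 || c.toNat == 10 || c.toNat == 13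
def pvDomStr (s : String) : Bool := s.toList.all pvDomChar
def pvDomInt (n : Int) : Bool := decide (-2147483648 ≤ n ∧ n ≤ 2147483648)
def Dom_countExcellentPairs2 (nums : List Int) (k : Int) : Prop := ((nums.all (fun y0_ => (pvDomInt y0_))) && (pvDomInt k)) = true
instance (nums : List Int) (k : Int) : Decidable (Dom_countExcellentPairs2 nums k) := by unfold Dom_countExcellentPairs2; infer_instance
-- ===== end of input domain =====

-- B replaces A's prefix-sum/diagonal-correction arithmetic by a direct double loop over
-- the popcount buckets, counting each ordered pair once (objective: simpler).

-- ===== PORT A =====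
-- helper: itertools.accumulate on a list of ints (running sums)
def pyAccumulate (run : Int) : List Int → List Int
  | [] => []
  | x :: xs => (run + x) :: pyAccumulate (run + x) xs

-- A's 'cnt' list: cnt1 = Counter(x.bit_count() for x in set(nums)); cnt = [cnt1[i] for i in range(30)]
def cntA (nums : List Int) : List Int :=
  (PySem.List.pyRange 0 30 1).map (fun i =>
    (PySem.Dict.counter ((PySem.Set.ofList nums).map (fun x => (PySem.Int.bitCount x : Int)))).getD i 0)

-- A's 'pre' list: pre = list(accumulate(cnt))
def preA (nums : List Int) : List Int := pyAccumulate 0 (cntA nums)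

def countExcellentPairs2 (nums : List Int) (k : Int) : Int :=
  if k > 58 then 0
  else
    (PySem.List.pyRange 1 ((preA nums).length : Int) 1).foldl (fun res i =>
      let j := max i (k - i)
      if j ≥ ((preA nums).length : Int) then res
      else res + 2 * PySem.List.pyGetD (cntA nums) i 0
                   * (PySem.List.pyGetD (preA nums) (-1) 0 - PySem.List.pyGetD (preA nums) (j - 1) 0)
             - (if i = j then PySem.List.pyGetD (cntA nums) i 0 * PySem.List.pyGetD (cntA nums) i 0 else 0)) 0

-- ===== PORT B =====
-- B's bucket array: cnt = [0]*30; for x in set(nums): if x.bit_count() < 30: cnt[x.bit_count()] += 1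
def cntB (nums : List Int) : List Int :=
  (PySem.Set.ofList nums).foldl (fun cnt x =>
      let b := (PySem.Int.bitCount x : Int)
      if b < 30 then PySem.List.pySetD cnt b (PySem.List.pyGetD cnt b 0 + 1) else cnt)
    (List.replicate 30 (0 : Int))

def countExcellentPairs2_alt (nums : List Int) (k : Int) : Int :=
  (PySem.List.pyRange 1 30 1).foldl (fun res i =>
    (PySem.List.pyRange 1 30 1).foldl (fun res j =>
      if i + j ≥ k then res + PySem.List.pyGetD (cntB nums) i 0 * PySem.List.pyGetD (cntB nums) j 0
      else res) res) 0

-- ===== PRECONDITION & SPEC =====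
def Spec_countExcellentPairs2 (nums : List Int) (k : Int) (out : Int) : Prop := out = countExcellentPairs2_alt nums k
instance (nums : List Int) (k : Int) (out : Int) : Decidable (Spec_countExcellentPairs2 nums k out) := by unfold Spec_countExcellentPairs2; infer_instance

-- ===== CLAIM (what is proved, stated in full; the proofs are below) =====
def Claim_equal_countExcellentPairs2 : Prop := ∀ (nums : List Int) (k : Int), Dom_countExcellentPairs2 nums k → Spec_countExcellentPairs2 nums k (countExcellentPairs2 nums k)

-- ===== LEMMAS AND PROOFS =====

-- number of distinct values of nums whose popcount is t
def cN (nums : List Int) (t : ℕ) : ℤ :=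
  ((PySem.Set.ofList nums).countP (fun x => PySem.Int.bitCount x == t) : ℤ)

-- A's loop body for popcount i, with the prefix-sum lookups written as range sums
def tA (c : ℕ → ℤ) (k : ℤ) (i : ℕ) : ℤ :=
  if (30:ℤ) ≤ max (i:ℤ) (k - (i:ℤ)) then 0
  else 2 * c i * ((∑ u ∈ Finset.range 30, c u) - ∑ u ∈ Finset.range ((max (i:ℤ) (k - (i:ℤ))).toNat), c u)
       - (if (i:ℤ) = max (i:ℤ) (k - (i:ℤ)) then c i * c i else 0)

-- the weight with which A's term for i counts the ordered pair (i, j)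
def wA (c : ℕ → ℤ) (k : ℤ) (i j : ℕ) : ℤ :=
  (if (i:ℤ) ≤ (j:ℤ) ∧ k ≤ (i:ℤ) + (j:ℤ) then 2 * (c i * c j) else 0)
  - (if i = j ∧ k ≤ 2 * (i:ℤ) then c i * c j else 0)

lemma sum_map_range (n : ℕ) (f : ℕ → ℤ) :
    ((List.range n).map f).sum = ∑ i ∈ Finset.range n, f i := rfl

lemma cntA_eq (nums : List Int) : cntA nums = (List.range 30).map (cN nums) := by
  unfold cntA
  rw [PySem.List.pyRange_one, (by decide : ((30:ℤ) - 0).toNat = 30), List.map_map]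
  apply List.map_congr_left
  intro t _
  simp only [Function.comp_apply, zero_add]
  rw [PySem.Dict.getD_counter]
  unfold cN
  congr 1
  rw [List.count_eq_countP, List.countP_map]
  apply List.countP_congr
  intro x _
  simp

lemma accLen (run : Int) (l : List Int) : (pyAccumulate run l).length = l.length := by
  induction l generalizing run with
  | nil => rfl
  | cons x xs ih => simp [pyAccumulate, ih]

lemma accGet (l : List Int) (run : Int) (t : ℕ) (ht : t < l.length) :
    (pyAccumulate run l).getD t 0 = run + (l.take (t+1)).sum := by
  induction l generalizing run t with
  | nil => simp at ht
  | cons x xs ih =>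
    cases t with
    | zero => simp [pyAccumulate]
    | succ t =>
      simp only [pyAccumulate, List.getD_eq_getElem?_getD, List.getElem?_cons_succ,
        List.take_succ_cons, List.sum_cons]
      rw [← List.getD_eq_getElem?_getD, ih _ _ (by simpa using ht)]
      ring

lemma preGet (nums : List Int) (t : ℕ) (ht : t < 30) :
    (preA nums).getD t 0 = ∑ u ∈ Finset.range (t+1), cN nums u := by
  unfold preA
  rw [cntA_eq, accGet _ _ _ (by simpa using ht), ← List.map_take, List.take_range,
      (by omega : min (t+1) 30 = t+1), sum_map_range]
  ring

lemma preLen (nums : List Int) : (preA nums).length = 30 := by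
  unfold preA
  rw [accLen, cntA_eq]
  simp

lemma bucket_getD (l : List Int) :
    ∀ (base : List Int), base.length = 30 → ∀ (t : ℕ), t < 30 →
    PySem.List.pyGetD (l.foldl (fun cnt x =>
      let b := (PySem.Int.bitCount x : Int)
      if b < 30 then PySem.List.pySetD cnt b (PySem.List.pyGetD cnt b 0 + 1) else cnt) base) (t : ℤ) 0
    = PySem.List.pyGetD base (t : ℤ) 0 + (l.countP (fun x => PySem.Int.bitCount x == t) : ℤ) := by
  induction l with
  | nil => intro base _ t _; simp
  | cons x xs ih =>
    intro base hb t ht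
    simp only [List.foldl_cons, List.countP_cons]
    by_cases hx : ((PySem.Int.bitCount x : Int) < 30)
    · rw [if_pos hx] at *
      rw [ih _ (by rw [PySem.List.length_pySetD, hb]) t ht,
          PySem.List.pyGetD_pySetD_natCast base (PySem.Int.bitCount x) t _ _ (by omega)]
      by_cases he : t = PySem.Int.bitCount x
      · rw [if_pos he, if_pos (by simp [he]), he]
        push_cast; ring
      · rw [if_neg he, if_neg (by simp; omega)]
        push_cast; ring
    · rw [if_neg hx, ih _ hb t ht, if_neg (by simp; omega)]
      push_cast; ring

lemma cntB_getD (nums : List Int) (n : ℕ) (h1 : n < 30) :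
    PySem.List.pyGetD (cntB nums) (n : ℤ) 0 = cN nums n := by
  unfold cntB cN
  rw [bucket_getD _ _ (by simp) n h1, PySem.List.pyGetD_natCast,
      List.getD_eq_getElem?_getD, List.getElem?_replicate, if_pos h1]
  simp

-- A's value, rewritten as a sum of its per-popcount terms
lemma A_form (nums : List Int) (k : Int) (hk : ¬ 58 < k) :
    countExcellentPairs2 nums k = ∑ t ∈ Finset.range 29, tA (cN nums) k (1+t) := by
  unfold countExcellentPairs2
  rw [if_neg hk, preLen]
  push_cast
  rw [PySem.List.foldl_congr_mem' _ _ (fun res i => res + tA (cN nums) k i.toNat) 0 ?_]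
  · rw [PySem.List.foldl_add, zero_add, PySem.List.pyRange_one,
        (by decide : ((30:ℤ) - 1).toNat = 29), List.map_map,
        List.map_congr_left (l := List.range 29)
          (g := fun t => tA (cN nums) k (1+t))
          (by intro t _; simp only [Function.comp_apply]; congr 1),
        sum_map_range]
  · intro i hi res
    rw [PySem.List.mem_pyRange_one] at hi
    obtain ⟨n, rfl⟩ : ∃ n : ℕ, i = (n:ℤ) := ⟨i.toNat, by omega⟩
    simp only [ge_iff_le]
    unfold tA
    rw [Int.toNat_natCast]
    by_cases hj : (30:ℤ) ≤ max (n:ℤ) (k - (n:ℤ))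
    · rw [if_pos hj, if_pos hj]
      ring
    · rw [if_neg hj, if_neg hj]
      have hcnt : PySem.List.pyGetD (cntA nums) (n:ℤ) 0 = cN nums n := by
        rw [cntA_eq, PySem.List.pyGetD_natCast,
            PySem.List.getD_map_range _ _ _ _ (by omega)]
      have hlast : PySem.List.pyGetD (preA nums) (-1) 0 = ∑ u ∈ Finset.range 30, cN nums u := by
        show (PySem.List.pyGet? (preA nums) (-1)).getD 0 = _
        rw [PySem.List.pyGet?_neg_one, List.getLast?_eq_getElem?, preLen,
            ← List.getD_eq_getElem?_getD]
        exact preGet nums 29 (by omega)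
      have hpre : PySem.List.pyGetD (preA nums) (max (n:ℤ) (k-(n:ℤ)) - 1) 0
          = ∑ u ∈ Finset.range ((max (n:ℤ) (k-(n:ℤ))).toNat), cN nums u := by
        rw [PySem.List.pyGetD_of_nonneg _ _ (by omega),
            preGet nums _ (by omega),
            (by omega : (max (n:ℤ) (k-(n:ℤ)) - 1).toNat + 1 = (max (n:ℤ) (k-(n:ℤ))).toNat)]
      rw [hcnt, hlast, hpre]
      split_ifs with hd
      · ring
      · ring

-- B's value, rewritten as the double sum over ordered popcount pairs
lemma B_form (nums : List Int) (k : Int) :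
    countExcellentPairs2_alt nums k
    = ∑ t ∈ Finset.range 29, ∑ u ∈ Finset.range 29,
        (if k ≤ (1+(t:ℤ)) + (1+(u:ℤ)) then cN nums (1+t) * cN nums (1+u) else 0) := by
  unfold countExcellentPairs2_alt
  rw [PySem.List.foldl_congr_mem' _ _ (fun res i =>
        res + ∑ u ∈ Finset.range 29,
          (if k ≤ i + (1+(u:ℤ)) then cN nums i.toNat * cN nums (1+u) else 0)) 0 ?_]
  · rw [PySem.List.foldl_add, zero_add, PySem.List.pyRange_one,
        (by decide : ((30:ℤ) - 1).toNat = 29), List.map_map,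
        List.map_congr_left (l := List.range 29)
          (g := fun t => ∑ u ∈ Finset.range 29,
            (if k ≤ (1+(t:ℤ)) + (1+(u:ℤ)) then cN nums (1+t) * cN nums (1+u) else 0)) ?_,
        sum_map_range]
    intro t _
    simp only [Function.comp_apply]
    apply Finset.sum_congr rfl
    intro u _
    rw [(by omega : ((1:ℤ) + (t:ℤ)).toNat = 1 + t)]
  · intro i hi res
    rw [PySem.List.mem_pyRange_one] at hi
    obtain ⟨n, rfl⟩ : ∃ n : ℕ, i = (n:ℤ) := ⟨i.toNat, by omega⟩
    simp only [ge_iff_le]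
    rw [PySem.List.foldl_congr_mem' _ _ (fun res j =>
          res + (if k ≤ (n:ℤ) + j then cN nums n * cN nums j.toNat else 0)) res ?_]
    · rw [PySem.List.foldl_add, PySem.List.pyRange_one,
          (by decide : ((30:ℤ) - 1).toNat = 29), List.map_map,
          List.map_congr_left (l := List.range 29)
            (g := fun u => if k ≤ (n:ℤ) + (1+(u:ℤ)) then cN nums n * cN nums (1+u) else 0) ?_,
          sum_map_range, Int.toNat_natCast]
      intro u _
      simp only [Function.comp_apply]
      rw [(by omega : ((1:ℤ) + (u:ℤ)).toNat = 1 + u)]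
    · intro j hj res2
      rw [PySem.List.mem_pyRange_one] at hj
      obtain ⟨m, rfl⟩ : ∃ m : ℕ, j = (m:ℤ) := ⟨j.toNat, by omega⟩
      have hci : PySem.List.pyGetD (cntB nums) (n:ℤ) 0 = cN nums n :=
        cntB_getD nums n (by omega)
      have hcj : PySem.List.pyGetD (cntB nums) (m:ℤ) 0 = cN nums m :=
        cntB_getD nums m (by omega)
      beta_reduce
      rw [hci, hcj, Int.toNat_natCast]
      split_ifs with h
      · rfl
      · ring

-- A's term for popcount i distributes over the ordered pairs (i, j) with weight wA
lemma expand (c : ℕ → ℤ) (k : ℤ) (t : ℕ) (ht : t < 29) :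
    tA c k (1+t) = ∑ u ∈ Finset.range 29, wA c k (1+t) (1+u) := by
  unfold tA wA
  push_cast
  by_cases h30 : (30:ℤ) ≤ max ((1:ℤ)+t) (k - (1+(t:ℤ)))
  · rw [if_pos h30]
    symm
    apply Finset.sum_eq_zero
    intro u hu
    simp only [Finset.mem_range] at hu
    rw [if_neg (by omega), if_neg (by
      rintro ⟨he, hle⟩
      omega)]
    ring
  · rw [if_neg h30]
    have hm : ((max ((1:ℤ)+t) (k - (1+(t:ℤ)))).toNat : ℤ) = max ((1:ℤ)+t) (k - (1+(t:ℤ))) := by omega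
    set m : ℕ := (max ((1:ℤ)+t) (k - (1+(t:ℤ)))).toNat with hmdef
    have hm1 : 1 ≤ m := by omega
    have hm29 : m ≤ 29 := by omega
    rw [Finset.sum_sub_distrib]
    have h1 : ∑ u ∈ Finset.range 29,
        (if (1:ℤ)+(t:ℤ) ≤ 1+(u:ℤ) ∧ k ≤ (1+(t:ℤ)) + (1+(u:ℤ)) then 2 * (c (1+t) * c (1+u)) else 0)
        = 2 * c (1+t) * ((∑ u ∈ Finset.range 30, c u) - ∑ u ∈ Finset.range m, c u) := by
      rw [← Finset.sum_Ico_eq_sub _ (by omega : m ≤ 30)]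
      have hcond : ∀ u ∈ Finset.range 29,
          (if (1:ℤ)+(t:ℤ) ≤ 1+(u:ℤ) ∧ k ≤ (1+(t:ℤ)) + (1+(u:ℤ)) then 2 * (c (1+t) * c (1+u)) else 0)
          = (if m - 1 ≤ u then 2 * (c (1+t) * c (1+u)) else 0) := by
        intro u hu
        simp only [Finset.mem_range] at hu
        apply if_congr _ rfl rfl
        omega
      rw [Finset.sum_congr rfl hcond, ← Finset.sum_filter,
          (by ext v; simp; omega : (Finset.range 29).filter (fun u => m - 1 ≤ u) = Finset.Ico (m-1) 29),
          Finset.sum_Ico_eq_sum_range, Finset.sum_Ico_eq_sum_range, Finset.mul_sum,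
          (by omega : 29 - (m-1) = 30 - m)]
      apply Finset.sum_congr rfl
      intro v _
      rw [(by omega : 1 + (m - 1 + v) = m + v)]
      ring
    have h2 : ∑ u ∈ Finset.range 29,
        (if 1+t = 1+u ∧ k ≤ 2 * ((1:ℤ)+(t:ℤ)) then c (1+t) * c (1+u) else 0)
        = if (1:ℤ)+(t:ℤ) = max ((1:ℤ)+t) (k - (1+(t:ℤ))) then c (1+t) * c (1+t) else 0 := by
      by_cases hd : k ≤ 2 * ((1:ℤ)+(t:ℤ))
      · rw [if_pos (by omega), Finset.sum_eq_single_of_mem t (Finset.mem_range.mpr ht)]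
        · rw [if_pos ⟨rfl, hd⟩]
        · intro u _ hne
          rw [if_neg (by rintro ⟨he, _⟩; omega)]
      · rw [if_neg (by omega), Finset.sum_eq_zero]
        intro u _
        rw [if_neg (by rintro ⟨_, hle⟩; omega)]
    rw [h1, h2]
-- symmetrised, A's weights match B's: each unordered pair is counted the same
lemma pointwise (c : ℕ → ℤ) (k : ℤ) (i j : ℕ) :
    wA c k i j + wA c k j i = 2 * (if k ≤ (i:ℤ) + (j:ℤ) then c i * c j else 0) := by
  unfold wA
  split_ifs <;> try (exfalso; omega)
  all_goals try ring

lemma core (c : ℕ → ℤ) (k : ℤ) :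
    ∑ t ∈ Finset.range 29, tA c k (1+t)
    = ∑ t ∈ Finset.range 29, ∑ u ∈ Finset.range 29,
        (if k ≤ (1+(t:ℤ)) + (1+(u:ℤ)) then c (1+t) * c (1+u) else 0) := by
  rw [Finset.sum_congr rfl (fun t ht => expand c k t (Finset.mem_range.mp ht))]
  apply mul_left_cancel₀ (by norm_num : (2:ℤ) ≠ 0)
  calc 2 * ∑ t ∈ Finset.range 29, ∑ u ∈ Finset.range 29, wA c k (1+t) (1+u)
      = (∑ t ∈ Finset.range 29, ∑ u ∈ Finset.range 29, wA c k (1+t) (1+u))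
        + ∑ t ∈ Finset.range 29, ∑ u ∈ Finset.range 29, wA c k (1+u) (1+t) := by
        rw [two_mul]
        congr 1
        exact Finset.sum_comm
    _ = ∑ t ∈ Finset.range 29, ∑ u ∈ Finset.range 29,
          (wA c k (1+t) (1+u) + wA c k (1+u) (1+t)) := by
        rw [← Finset.sum_add_distrib]
        apply Finset.sum_congr rfl
        intro t _
        rw [← Finset.sum_add_distrib]
    _ = ∑ t ∈ Finset.range 29, ∑ u ∈ Finset.range 29,
          2 * (if k ≤ (1+(t:ℤ)) + (1+(u:ℤ)) then c (1+t) * c (1+u) else 0) := by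
        apply Finset.sum_congr rfl; intro t _
        apply Finset.sum_congr rfl; intro u _
        rw [pointwise]
        push_cast
        ring_nf
    _ = 2 * ∑ t ∈ Finset.range 29, ∑ u ∈ Finset.range 29,
          (if k ≤ (1+(t:ℤ)) + (1+(u:ℤ)) then c (1+t) * c (1+u) else 0) := by
        rw [Finset.mul_sum]
        apply Finset.sum_congr rfl
        intro t _
        rw [Finset.mul_sum]

-- ===== VERDICT (by name: the statement is the Claim_ definition above) =====
theorem countExcellentPairs2_spec : Claim_equal_countExcellentPairs2 := by
  intro nums k _
  unfold Spec_countExcellentPairs2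
  rw [B_form]
  by_cases hk : 58 < k
  · have h0 : countExcellentPairs2 nums k = 0 := by
      unfold countExcellentPairs2; rw [if_pos hk]
    rw [h0]
    symm
    apply Finset.sum_eq_zero; intro t ht
    apply Finset.sum_eq_zero; intro u hu
    rw [if_neg]
    simp only [Finset.mem_range] at ht hu
    omega
  · rw [A_form nums k hk, core]
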